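-- pv_equiv track=rewrite | github.com/JiriCZTX/Jiri_Musil_Solo_ITAI2376 | tools/talent_tools.py | _detect_seniority
-- ===== SOURCE A (Python) =====
-- _SENIORITY_LEVELS = [
--     ("chief", 8), ("cto", 8), ("ceo", 8), ("cfo", 8),
--     ("vp of", 7), ("vp ", 7), ("vice president", 7),
--     ("director", 6), ("head of", 6),
--     ("principal", 5),
--     ("lead ", 4), (" lead", 4), ("staff ", 4), ("manager", 4),
--     ("supervisor", 4), ("superintendent", 4),
--     ("senior ", 3), ("sr.", 3), ("sr ", 3),
--     ("mid-level", 2), ("mid level", 2), ("regular", 2),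
--     ("associate ", 1), ("junior", 1), ("entry-level", 0), ("entry level", 0),
-- ]
--
-- def _detect_seniority(text, default=2):
--     """Return numeric seniority level (0-8) from first ~300 chars of text."""
--     head = text[:300].lower()
--     best = None
--     for kw, lvl in _SENIORITY_LEVELS:
--         if kw in head:
--             if best is None or lvl > best:
--                 best = lvl
--     return best if best is not None else default
-- ===== SOURCE B (Python) =====
-- # Keywords grouped by level, highest level first: the first group with a
-- # matching keyword gives the maximum level directly (early exit).
-- _LEVEL_KEYWORDS = [
--     (8, ["chief", "cto", "ceo", "cfo"]),
--     (7, ["vp of", "vp ", "vice president"]),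
--     (6, ["director", "head of"]),
--     (5, ["principal"]),
--     (4, ["lead ", " lead", "staff ", "manager", "supervisor", "superintendent"]),
--     (3, ["senior ", "sr.", "sr "]),
--     (2, ["mid-level", "mid level", "regular"]),
--     (1, ["associate ", "junior"]),
--     (0, ["entry-level", "entry level"]),
-- ]
--
-- def _detect_seniority(text, default=2):
--     """Return numeric seniority level (0-8) from first ~300 chars of text."""
--     head = text[:300].lower()
--     for lvl, kws in _LEVEL_KEYWORDS:
--         if any(kw in head for kw in kws):
--             return lvl
--     return default
-- ===== Notes on version B (the rewrite author's own statement) =====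
-- stated objective: alternative
-- what changed: A scans a flat keyword list tracking a running maximum level; B restructures the table into keyword groups keyed by level in descending order and returns the level of the first group containing a matching keyword (early exit), which equals the maximum.
import Mathlib
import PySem

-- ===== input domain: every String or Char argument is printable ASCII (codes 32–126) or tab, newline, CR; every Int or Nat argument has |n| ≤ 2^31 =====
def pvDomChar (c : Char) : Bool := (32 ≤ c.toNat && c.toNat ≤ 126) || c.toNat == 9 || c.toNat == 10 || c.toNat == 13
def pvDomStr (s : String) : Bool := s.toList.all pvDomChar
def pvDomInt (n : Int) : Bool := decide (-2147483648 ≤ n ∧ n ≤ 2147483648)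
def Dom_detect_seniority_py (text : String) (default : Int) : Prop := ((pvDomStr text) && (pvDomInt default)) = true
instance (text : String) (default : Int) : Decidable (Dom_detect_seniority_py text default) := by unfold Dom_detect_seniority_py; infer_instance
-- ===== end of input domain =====

-- B replaces A's flat scan with a running maximum by a table of keyword groups
-- keyed by level in descending order, returning the first group's level that has
-- any matching keyword (early exit); alternative algorithm, same cost.

-- ===== PORT A =====
def senTable : List (String × Int) :=
  [("chief", 8), ("cto", 8), ("ceo", 8), ("cfo", 8),
   ("vp of", 7), ("vp ", 7), ("vice president", 7),
   ("director", 6), ("head of", 6),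
   ("principal", 5),
   ("lead ", 4), (" lead", 4), ("staff ", 4), ("manager", 4),
   ("supervisor", 4), ("superintendent", 4),
   ("senior ", 3), ("sr.", 3), ("sr ", 3),
   ("mid-level", 2), ("mid level", 2), ("regular", 2),
   ("associate ", 1), ("junior", 1), ("entry-level", 0), ("entry level", 0)]

-- one loop step of A: update the running best with one (kw, lvl) pair
def senStep (p : String × Int → Bool) (best : Option Int) (kv : String × Int) : Option Int :=
  if p kv then
    match best with
    | none => some kv.2
    | some b => if kv.2 > b then some kv.2 else best
  else best

def detect_seniority_py (text : String) (default : Int) : Int :=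
  let head := PySem.Str.lower (PySem.Str.slice text none (some 300))
  let best := senTable.foldl (senStep (fun kv => PySem.Str.isIn kv.1 head)) none
  match best with
  | some b => b
  | none => default

-- ===== PORT B =====
-- keyword groups keyed by level, highest level first (Source B's _LEVEL_KEYWORDS)
def senGroups : List (Int × List String) :=
  [(8, ["chief", "cto", "ceo", "cfo"]),
   (7, ["vp of", "vp ", "vice president"]),
   (6, ["director", "head of"]),
   (5, ["principal"]),
   (4, ["lead ", " lead", "staff ", "manager", "supervisor", "superintendent"]),
   (3, ["senior ", "sr.", "sr "]),
   (2, ["mid-level", "mid level", "regular"]),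
   (1, ["associate ", "junior"]),
   (0, ["entry-level", "entry level"])]

def detect_seniority_py_alt (text : String) (default : Int) : Int :=
  let head := PySem.Str.lower (PySem.Str.slice text none (some 300))
  match senGroups.find? (fun g => g.2.any (fun kw => PySem.Str.isIn kw head)) with
  | some g => g.1
  | none => default

-- ===== PRECONDITION & SPEC =====
def Spec_detect_seniority_py (text : String) (default : Int) (out : Int) : Prop := out = detect_seniority_py_alt text default
instance (text : String) (default : Int) (out : Int) : Decidable (Spec_detect_seniority_py text default out) := by unfold Spec_detect_seniority_py; infer_instance

-- ===== CLAIM (what is proved, stated in full; the proofs are below) =====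
def Claim_equal_detect_seniority_py : Prop := ∀ (text : String) (default : Int), Dom_detect_seniority_py text default → Spec_detect_seniority_py text default (detect_seniority_py text default)

-- ===== LEMMAS AND PROOFS =====

-- A's flat table is exactly the flattening of B's level groups
lemma senTable_eq_flatten :
    senGroups.flatMap (fun g => g.2.map (fun kw => (kw, g.1))) = senTable := by
  decide

-- membership translation between the flat table and the groups
lemma mem_senTable_iff (kv : String × Int) :
    kv ∈ senTable ↔ ∃ g ∈ senGroups, kv.1 ∈ g.2 ∧ kv.2 = g.1 := by
  rw [← senTable_eq_flatten]
  simp only [List.mem_flatMap, List.mem_map]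
  constructor
  · rintro ⟨g, hg, kw, hkw, rfl⟩
    exact ⟨g, hg, hkw, rfl⟩
  · rintro ⟨g, hg, h1, h2⟩
    exact ⟨g, hg, kv.1, h1, by rw [Prod.ext_iff]; exact ⟨rfl, h2.symm⟩⟩

-- A's fold with a present accumulator returns the max of the accumulator and matching levels
lemma senFold_acc (p : String × Int → Bool) (l : List (String × Int)) (x : Int) :
    ∃ m, l.foldl (senStep p) (some x) = some m ∧ x ≤ m ∧
      (m = x ∨ ∃ kv ∈ l, p kv = true ∧ kv.2 = m) ∧
      (∀ kv ∈ l, p kv = true → kv.2 ≤ m) := by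
  induction l generalizing x with
  | nil => exact ⟨x, rfl, le_refl x, Or.inl rfl, by simp⟩
  | cons a t ih =>
    by_cases hpa : p a = true
    · by_cases hgt : a.2 > x
      · obtain ⟨m, hm, hxm, hcases, hbound⟩ := ih a.2
        refine ⟨m, ?_, by omega, ?_, ?_⟩
        · simpa [senStep, hpa, hgt] using hm
        · rcases hcases with h | ⟨kv, hkv, hp, he⟩
          · exact Or.inr ⟨a, by simp, hpa, h.symm ▸ rfl⟩
          · exact Or.inr ⟨kv, by simp [hkv], hp, he⟩
        · intro kv hkv hp
          rcases List.mem_cons.mp hkv with rfl | hkv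
          · omega
          · exact hbound kv hkv hp
      · obtain ⟨m, hm, hxm, hcases, hbound⟩ := ih x
        refine ⟨m, ?_, hxm, hcases.imp id (fun ⟨kv, hkv, hp, he⟩ => ⟨kv, by simp [hkv], hp, he⟩), ?_⟩
        · simpa [senStep, hpa, hgt] using hm
        · intro kv hkv hp
          rcases List.mem_cons.mp hkv with rfl | hkv
          · omega
          · exact hbound kv hkv hp
    · obtain ⟨m, hm, hxm, hcases, hbound⟩ := ih x
      refine ⟨m, ?_, hxm, hcases.imp id (fun ⟨kv, hkv, hp, he⟩ => ⟨kv, by simp [hkv], hp, he⟩), ?_⟩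
      · simpa [senStep, hpa] using hm
      · intro kv hkv hp
        rcases List.mem_cons.mp hkv with rfl | hkv
        · simp [hpa] at hp
        · exact hbound kv hkv hp

-- A's fold from none: either no keyword matches, or the result is the max matching level
lemma senFold_spec (p : String × Int → Bool) (l : List (String × Int)) :
    (l.foldl (senStep p) none = none ∧ ∀ kv ∈ l, p kv = false)
    ∨ ∃ m, l.foldl (senStep p) none = some m ∧
        (∃ kv ∈ l, p kv = true ∧ kv.2 = m) ∧
        (∀ kv ∈ l, p kv = true → kv.2 ≤ m) := by
  induction l with
  | nil => exact Or.inl ⟨rfl, by simp⟩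
  | cons a t ih =>
    by_cases hpa : p a = true
    · obtain ⟨m, hm, hxm, hcases, hbound⟩ := senFold_acc p t a.2
      refine Or.inr ⟨m, ?_, ?_, ?_⟩
      · simpa [senStep, hpa] using hm
      · rcases hcases with h | ⟨kv, hkv, hp, he⟩
        · exact ⟨a, by simp, hpa, h.symm ▸ rfl⟩
        · exact ⟨kv, by simp [hkv], hp, he⟩
      · intro kv hkv hp
        rcases List.mem_cons.mp hkv with rfl | hkv
        · omega
        · exact hbound kv hkv hp
    · rcases ih with ⟨hn, hall⟩ | ⟨m, hm, hex, hbound⟩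
      · refine Or.inl ⟨?_, ?_⟩
        · simpa [senStep, hpa] using hn
        · intro kv hkv
          rcases List.mem_cons.mp hkv with rfl | hkv
          · simpa using hpa
          · exact hall kv hkv
      · refine Or.inr ⟨m, ?_, ?_, ?_⟩
        · simpa [senStep, hpa] using hm
        · obtain ⟨kv, hkv, hp, he⟩ := hex
          exact ⟨kv, by simp [hkv], hp, he⟩
        · intro kv hkv hp
          rcases List.mem_cons.mp hkv with rfl | hkv
          · simp [hpa] at hp
          · exact hbound kv hkv hp

-- the group levels are (non-strictly) descending
lemma senGroups_sorted : senGroups.Pairwise (fun a b => b.1 ≤ a.1) := by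
  decide

-- on a level-descending group list, find? returns a matching group of maximal level
lemma senGroupFind_spec (q : Int × List String → Bool) (l : List (Int × List String))
    (hs : l.Pairwise (fun a b => b.1 ≤ a.1)) (g : Int × List String)
    (hf : l.find? q = some g) :
    q g = true ∧ g ∈ l ∧ ∀ g' ∈ l, q g' = true → g'.1 ≤ g.1 := by
  induction l with
  | nil => simp at hf
  | cons a t ih =>
    rcases List.pairwise_cons.mp hs with ⟨ha, ht⟩
    by_cases hqa : q a = true
    · simp only [List.find?_cons, hqa] at hf
      obtain rfl : a = g := by simpa using hf
      refine ⟨hqa, by simp, ?_⟩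
      intro g' hg' _
      rcases List.mem_cons.mp hg' with rfl | hg'
      · exact le_refl _
      · exact ha g' hg'
    · simp only [Bool.not_eq_true] at hqa
      simp only [List.find?_cons, hqa] at hf
      obtain ⟨h1, h2, h3⟩ := ih ht hf
      refine ⟨h1, by simp [h2], ?_⟩
      intro g' hg' hq
      rcases List.mem_cons.mp hg' with rfl | hg'
      · simp [hqa] at hq
      · exact h3 g' hg' hq

-- the generic equation between A's running-max fold and B's group early-exit scan,
-- for any keyword-match predicate pk
lemma sen_main (pk : String → Bool) (d : Int) :
    (match senTable.foldl (senStep (fun kv => pk kv.1)) none with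
     | some b => b
     | none => d)
    = (match senGroups.find? (fun g => g.2.any pk) with
       | some g => g.1
       | none => d) := by
  rcases hfind : senGroups.find? (fun g => g.2.any pk) with _ | g
  · have hall : ∀ g ∈ senGroups, ¬ (g.2.any pk) = true := by
      simpa using List.find?_eq_none.mp hfind
    rcases senFold_spec (fun kv => pk kv.1) senTable with ⟨hn, _⟩ | ⟨m, hm, ⟨kv, hkv, hpkv, _⟩, _⟩
    · rw [hn, hfind]
    · obtain ⟨g, hg, hmem, _⟩ := (mem_senTable_iff kv).mp hkv
      exact absurd (List.any_eq_true.mpr ⟨kv.1, hmem, hpkv⟩) (hall g hg)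
  · obtain ⟨hq, hmemg, hmax⟩ := senGroupFind_spec (fun g => g.2.any pk) senGroups senGroups_sorted g hfind
    obtain ⟨kw, hkw, hpkw⟩ := List.any_eq_true.mp hq
    have hkv : (kw, g.1) ∈ senTable := (mem_senTable_iff (kw, g.1)).mpr ⟨g, hmemg, hkw, rfl⟩
    rcases senFold_spec (fun kv => pk kv.1) senTable with ⟨_, hall⟩ | ⟨m, hm, ⟨kv', hkv', hpkv', he'⟩, hbound⟩
    · exact absurd hpkw (by simpa using hall (kw, g.1) hkv)
    · have h1 : m ≤ g.1 := by
        obtain ⟨g', hg', hmem', heq'⟩ := (mem_senTable_iff kv').mp hkv'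
        have := hmax g' hg' (List.any_eq_true.mpr ⟨kv'.1, hmem', hpkv'⟩)
        omega
      have h2 : g.1 ≤ m := hbound (kw, g.1) hkv hpkw
      rw [hm, hfind]
      show m = g.1
      omega

-- ===== VERDICT (by name: the statement is the Claim_ definition above) =====
theorem detect_seniority_py_spec : Claim_equal_detect_seniority_py := by
  intro text default _
  unfold Spec_detect_seniority_py detect_seniority_py detect_seniority_py_alt
  exact sen_main (fun kw => PySem.Str.isIn kw
    (PySem.Str.lower (PySem.Str.slice text none (some 300)))) default
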